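-- pv_equiv track=rewrite | github.com/rivanstunnel/scan_angka_otomatis | tab4.py | zigzag_pattern
-- ===== SOURCE A (Python) =====
-- def zigzag_pattern(data):
--     pattern = 0
--     for i in range(2, len(data)):
--         a = int(str(data[i - 2])[-1])
--         b = int(str(data[i - 1])[-1])
--         c = int(str(data[i])[-1])
--         if (a < b > c) or (a > b < c):
--             pattern += 1
--     return pattern
-- ===== SOURCE B (Python) =====
-- def zigzag_pattern(data):
--     digits = [int(str(x)[-1]) for x in data]
--     signs = [(d2 > d1) - (d2 < d1) for d1, d2 in zip(digits, digits[1:])]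
--     return sum(1 for s, t in zip(signs, signs[1:]) if s * t < 0)
-- ===== Notes on version B (the rewrite author's own statement) =====
-- stated objective: faster
-- what changed: A fuses everything into one indexed loop that re-extracts the last decimal digit of str(x) three times per position; B decomposes into three materialised phases -- last-digit list (each digit extracted once), direction-sign list, count of adjacent sign pairs with negative product.
import Mathlib
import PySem

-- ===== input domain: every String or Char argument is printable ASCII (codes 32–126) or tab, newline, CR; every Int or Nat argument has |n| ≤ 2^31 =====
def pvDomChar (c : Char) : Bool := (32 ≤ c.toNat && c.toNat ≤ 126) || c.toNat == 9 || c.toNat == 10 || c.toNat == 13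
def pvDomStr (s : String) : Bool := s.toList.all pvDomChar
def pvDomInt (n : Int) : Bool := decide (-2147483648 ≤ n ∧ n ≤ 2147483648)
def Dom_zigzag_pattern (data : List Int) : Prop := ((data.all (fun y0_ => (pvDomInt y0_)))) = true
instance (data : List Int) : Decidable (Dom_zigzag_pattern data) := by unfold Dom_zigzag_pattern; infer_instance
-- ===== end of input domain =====

-- B rebuilds the zigzag count in three explicit phases (last digits -> direction signs -> count of
-- adjacent opposite-sign pairs) instead of A's single fused triple-test loop; B extracts each last
-- digit once instead of three times (measured constant-factor speedup).


-- ===== PORT A =====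
-- int(str(x)[-1]) — str(x) is never empty and its last char is always a decimal digit,
-- so both Options are always `some` and the `.getD 0` defaults are unreachable.
def pyLastDigit (x : Int) : Int :=
  ((PySem.Str.pyGet? (PySem.Int.toStr x) (-1)).bind
    (fun c => PySem.Int.ofStr? (String.ofList [c]))).getD 0

def zigzag_pattern (data : List Int) : Int :=
  (PySem.List.pyRange 2 (data.length : Int)).foldl (fun pattern i =>
    let a := pyLastDigit (PySem.List.pyGetD data (i - 2) 0)
    let b := pyLastDigit (PySem.List.pyGetD data (i - 1) 0)
    let c := pyLastDigit (PySem.List.pyGetD data i 0)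
    if (a < b ∧ c < b) ∨ (b < a ∧ b < c) then pattern + 1 else pattern) 0

-- ===== PORT B =====
def zigzag_pattern_alt (data : List Int) : Int :=
  let digits := data.map pyLastDigit
  let signs := (digits.zip (PySem.List.slice digits (some 1) none)).map
      (fun p => (if p.1 < p.2 then (1 : Int) else 0) - (if p.2 < p.1 then (1 : Int) else 0))
  ((signs.zip (PySem.List.slice signs (some 1) none)).map
      (fun p => if p.1 * p.2 < 0 then (1 : Int) else 0)).sum

-- ===== PRECONDITION & SPEC =====
def Spec_zigzag_pattern (data : List Int) (out : Int) : Prop := out = zigzag_pattern_alt data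
instance (data : List Int) (out : Int) : Decidable (Spec_zigzag_pattern data out) := by unfold Spec_zigzag_pattern; infer_instance

-- ===== CLAIM (what is proved, stated in full; the proofs are below) =====
def Claim_equal_zigzag_pattern : Prop := ∀ (data : List Int), Dom_zigzag_pattern data → Spec_zigzag_pattern data (zigzag_pattern data)

-- ===== LEMMAS AND PROOFS =====

-- common reference function: the zigzag count on an (already extracted) digit list
def countZig : List Int → Int
  | a :: b :: c :: rest =>
      (if (a < b ∧ c < b) ∨ (b < a ∧ b < c) then 1 else 0) + countZig (b :: c :: rest)
  | _ => 0

theorem czeq (a b c : Int) (r : List Int) :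
    countZig (a :: b :: c :: r)
      = (if (a < b ∧ c < b) ∨ (b < a ∧ b < c) then 1 else 0) + countZig (b :: c :: r) := rfl

-- A's loop expressed on the digit list
def rangeCount (ds : List Int) : Int :=
  (PySem.List.pyRange 2 (ds.length : Int)).foldl (fun pattern i =>
    if (PySem.List.pyGetD ds (i - 2) 0 < PySem.List.pyGetD ds (i - 1) 0
          ∧ PySem.List.pyGetD ds i 0 < PySem.List.pyGetD ds (i - 1) 0)
        ∨ (PySem.List.pyGetD ds (i - 1) 0 < PySem.List.pyGetD ds (i - 2) 0
          ∧ PySem.List.pyGetD ds (i - 1) 0 < PySem.List.pyGetD ds i 0)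
    then pattern + 1 else pattern) 0

-- B's sign of a step
def sgnStep (a b : Int) : Int := (if a < b then 1 else 0) - (if b < a then 1 else 0)

-- B's pipeline on the digit list
def pairCount (ds : List Int) : Int :=
  let signs := (ds.zip ds.tail).map (fun p => sgnStep p.1 p.2)
  ((signs.zip signs.tail).map (fun p => if p.1 * p.2 < 0 then (1 : Int) else 0)).sum

theorem sgn_mul_neg (a b c : Int) :
    ((if sgnStep a b * sgnStep b c < 0 then (1 : Int) else 0)
      = if (a < b ∧ c < b) ∨ (b < a ∧ b < c) then 1 else 0) := by
  unfold sgnStep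
  rcases lt_trichotomy a b with h | h | h <;> rcases lt_trichotomy b c with h' | h' | h' <;>
    simp [h, h', lt_asymm]

theorem pairCount_eq_countZig (ds : List Int) : pairCount ds = countZig ds := by
  induction ds with
  | nil => rfl
  | cons a t ih =>
    cases t with
    | nil => rfl
    | cons b t' =>
      cases t' with
      | nil => rfl
      | cons c r =>
        have hstep : pairCount (a :: b :: c :: r)
            = (if sgnStep a b * sgnStep b c < 0 then (1 : Int) else 0)
              + pairCount (b :: c :: r) := rfl
        rw [hstep, ih, czeq, sgn_mul_neg]

theorem countZig_append (l : List Int) (p q x : Int) :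
    countZig (l ++ [p, q, x]) = countZig (l ++ [p, q])
      + (if (p < q ∧ x < q) ∨ (q < p ∧ q < x) then 1 else 0) := by
  induction l with
  | nil => simp [countZig]
  | cons a l ih =>
    cases l with
    | nil => simp [countZig]
    | cons u l' =>
      cases l' with
      | nil => simp [countZig]; ring
      | cons v l'' =>
        simp only [List.cons_append] at *
        rw [czeq, czeq, ih]; ring

theorem pyGetD_append_left (zs : List Int) (x : Int) (j : Int) (h0 : 0 ≤ j)
    (h1 : j < (zs.length : Int)) :
    PySem.List.pyGetD (zs ++ [x]) j 0 = PySem.List.pyGetD zs j 0 := by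
  rw [PySem.List.pyGetD_eq_getElem _ _ h0 (by simp; omega),
      PySem.List.pyGetD_eq_getElem _ _ h0 h1]
  exact List.getElem_append_left (by omega)

theorem rangeCount_append (ys : List Int) (p q x : Int) :
    rangeCount (ys ++ [p, q, x]) = rangeCount (ys ++ [p, q])
      + (if (p < q ∧ x < q) ∨ (q < p ∧ q < x) then 1 else 0) := by
  have hzs : ys ++ [p, q, x] = (ys ++ [p, q]) ++ [x] := by simp
  set zs := ys ++ [p, q] with hzsdef
  have hLen : zs.length = ys.length + 2 := by simp [hzsdef]
  unfold rangeCount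
  rw [hzs]
  have hlen : (((zs ++ [x]).length : Int)) = (zs.length : Int) + 1 := by simp
  rw [hlen, PySem.List.pyRange_one_succ_right (by omega), List.foldl_append,
    List.foldl_cons, List.foldl_nil]
  have hbody :
      (PySem.List.pyRange 2 (zs.length : Int)).foldl (fun pattern i =>
        if (PySem.List.pyGetD (zs ++ [x]) (i - 2) 0 < PySem.List.pyGetD (zs ++ [x]) (i - 1) 0
              ∧ PySem.List.pyGetD (zs ++ [x]) i 0 < PySem.List.pyGetD (zs ++ [x]) (i - 1) 0)
            ∨ (PySem.List.pyGetD (zs ++ [x]) (i - 1) 0 < PySem.List.pyGetD (zs ++ [x]) (i - 2) 0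
              ∧ PySem.List.pyGetD (zs ++ [x]) (i - 1) 0 < PySem.List.pyGetD (zs ++ [x]) i 0)
        then pattern + 1 else pattern) (0 : Int)
      = (PySem.List.pyRange 2 (zs.length : Int)).foldl (fun pattern i =>
        if (PySem.List.pyGetD zs (i - 2) 0 < PySem.List.pyGetD zs (i - 1) 0
              ∧ PySem.List.pyGetD zs i 0 < PySem.List.pyGetD zs (i - 1) 0)
            ∨ (PySem.List.pyGetD zs (i - 1) 0 < PySem.List.pyGetD zs (i - 2) 0
              ∧ PySem.List.pyGetD zs (i - 1) 0 < PySem.List.pyGetD zs i 0)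
        then pattern + 1 else pattern) (0 : Int) := by
    apply PySem.List.foldl_congr_mem
    intro acc i hi
    rw [PySem.List.mem_pyRange_one] at hi
    rw [pyGetD_append_left zs x (i - 2) (by omega) (by omega),
        pyGetD_append_left zs x (i - 1) (by omega) (by omega),
        pyGetD_append_left zs x i (by omega) (by omega)]
  rw [hbody]
  have hp : PySem.List.pyGetD (zs ++ [x]) ((zs.length : Int) - 2) 0 = p := by
    rw [pyGetD_append_left zs x _ (by omega) (by omega),
        PySem.List.pyGetD_eq_getElem _ _ (by omega) (by omega)]
    have ht : (((zs.length : Int)) - 2).toNat = ys.length := by omega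
    simp only [ht]
    show (ys ++ [p, q])[ys.length]'(by simp) = p
    simp
  have hq : PySem.List.pyGetD (zs ++ [x]) ((zs.length : Int) - 1) 0 = q := by
    rw [pyGetD_append_left zs x _ (by omega) (by omega),
        PySem.List.pyGetD_eq_getElem _ _ (by omega) (by omega)]
    have ht : (((zs.length : Int)) - 1).toNat = ys.length + 1 := by omega
    simp only [ht]
    show (ys ++ [p, q])[ys.length + 1]'(by simp) = q
    simp
  have hx : PySem.List.pyGetD (zs ++ [x]) (zs.length : Int) 0 = x := by
    rw [PySem.List.pyGetD_eq_getElem _ _ (by omega) (by simp)]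
    simp
  rw [hp, hq, hx]
  split <;> ring

theorem rangeCount_eq_countZig (ds : List Int) : rangeCount ds = countZig ds := by
  induction ds using List.reverseRecOn with
  | nil => rfl
  | append_singleton ds x ih =>
    by_cases h2 : 2 ≤ ds.length
    · obtain ⟨ys, p, q, rfl⟩ : ∃ ys p q, ds = ys ++ [p, q] := by
        rcases hr : ds.reverse with _ | ⟨q, t⟩
        · have : ds = [] := by simpa using congrArg List.reverse hr
          subst this; simp at h2
        · rcases t with _ | ⟨p, ys'⟩
          · have : ds = [q] := by simpa using congrArg List.reverse hr
            subst this; simp at h2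
          · refine ⟨ys'.reverse, p, q, ?_⟩
            have := congrArg List.reverse hr
            simpa using this
      have he : (ys ++ [p, q]) ++ [x] = ys ++ [p, q, x] := by simp
      rw [he, rangeCount_append, countZig_append, ih]
    · rcases ds with _ | ⟨a, _ | ⟨b, t⟩⟩
      · rfl
      · rfl
      · exfalso; apply h2; simp

theorem zigzag_eq_rangeCount (data : List Int) :
    zigzag_pattern data = rangeCount (data.map pyLastDigit) := by
  have hd0 : pyLastDigit 0 = 0 := by decide
  have hmap : ∀ j : Int, pyLastDigit (PySem.List.pyGetD data j 0)
      = PySem.List.pyGetD (data.map pyLastDigit) j 0 := by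
    intro j
    have h := PySem.List.pyGetD_map pyLastDigit data j (0 : Int)
    rw [← h, hd0]
  unfold zigzag_pattern rangeCount
  rw [List.length_map]
  apply PySem.List.foldl_congr_mem
  intro acc i _
  simp only [hmap]

theorem alt_eq_pairCount (data : List Int) :
    zigzag_pattern_alt data = pairCount (data.map pyLastDigit) := by
  unfold zigzag_pattern_alt pairCount
  simp only [PySem.List.slice_from_one, sgnStep]

-- ===== VERDICT (by name: the statement is the Claim_ definition above) =====
theorem zigzag_pattern_spec : Claim_equal_zigzag_pattern := by
  intro data _
  unfold Spec_zigzag_pattern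
  rw [zigzag_eq_rangeCount, alt_eq_pairCount, rangeCount_eq_countZig, pairCount_eq_countZig]
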